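-- pv_equiv track=rewrite | github.com/tnq177/dsa-for-fun | holstein.py | is_enough
-- ===== SOURCE A (Python) =====
-- def is_enough(feed_idxs, feeds, target):
--     total = [0] * len(feeds[0])
--     for feed_idx in feed_idxs:
--         feed = feeds[feed_idx]
--         for i, f in enumerate(feed):
--             total[i] += f
--
--     for a, b in zip(total, target):
--         if a < b:
--             return False
--     return True
-- ===== SOURCE B (Python) =====
-- def is_enough(feed_idxs, feeds, target):
--     # Column-wise single pass with early exit: no per-component `total` array.
--     rows = [feeds[idx] for idx in feed_idxs]
--     n = min(len(feeds[0]), len(target))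
--     for i in range(n):
--         s = sum(row[i] for row in rows if i < len(row))
--         if s < target[i]:
--             return False
--     return True
-- ===== Notes on version B (the rewrite author's own statement) =====
-- stated objective: alternative
-- what changed: B drops the intermediate per-component total array and inverts the loop nesting: one column-wise pass summing feeds[idx][i] over the selected rows with early exit on the first short component.
import Mathlib
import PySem

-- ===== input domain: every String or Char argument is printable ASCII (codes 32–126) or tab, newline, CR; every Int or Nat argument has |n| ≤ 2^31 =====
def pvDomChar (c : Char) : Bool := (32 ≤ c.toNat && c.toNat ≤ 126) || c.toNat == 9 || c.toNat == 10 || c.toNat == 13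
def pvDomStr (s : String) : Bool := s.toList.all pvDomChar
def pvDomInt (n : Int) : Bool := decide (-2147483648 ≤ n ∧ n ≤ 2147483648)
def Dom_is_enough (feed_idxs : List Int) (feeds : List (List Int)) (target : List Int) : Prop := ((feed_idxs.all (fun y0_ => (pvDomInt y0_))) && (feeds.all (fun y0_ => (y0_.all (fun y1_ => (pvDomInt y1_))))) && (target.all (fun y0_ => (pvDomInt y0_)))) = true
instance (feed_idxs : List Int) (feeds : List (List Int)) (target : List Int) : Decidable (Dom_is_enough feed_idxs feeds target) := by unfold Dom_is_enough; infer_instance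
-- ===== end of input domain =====

-- B replaces A's accumulate-then-compare two-pass (with its intermediate per-component
-- `total` array) by a single column-wise pass with early exit (objective: alternative).

-- ===== PORT A =====
-- inner loop `for i, f in enumerate(feed): total[i] += f`; enumerate indices are ≥ 0 so
-- `.toNat` is exact here; Python raises when i ≥ len(total) (excluded by Pre_; List.set is a no-op there)
def pvA_addRow (total feed : List Int) : List Int :=
  (PySem.List.enumerate feed 0).foldl
    (fun t p => t.set p.1.toNat (t.getD p.1.toNat 0 + p.2)) total

def is_enough (feed_idxs : List Int) (feeds : List (List Int)) (target : List Int) : Bool :=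
  -- total = [0] * len(feeds[0])   (feeds[0] raises on empty feeds: excluded by Pre_)
  let total0 : List Int := List.replicate ((PySem.List.pyGet? feeds 0).getD []).length 0
  -- for feed_idx in feed_idxs: feed = feeds[feed_idx]; …  (invalid index raises: excluded by Pre_)
  let total := feed_idxs.foldl
    (fun t idx => pvA_addRow t ((PySem.List.pyGet? feeds idx).getD [])) total0
  -- for a, b in zip(total, target): if a < b: return False / return True
  (total.zip target).all (fun p => !decide (p.1 < p.2))

-- ===== PORT B =====
-- s = sum(row[i] for row in rows if i < len(row)) : getD i 0 is exactly "row[i] if i < len(row) else skip"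
def pvColSum (rows : List (List Int)) (i : Nat) : Int :=
  rows.foldl (fun s row => s + row.getD i 0) 0

def is_enough_alt (feed_idxs : List Int) (feeds : List (List Int)) (target : List Int) : Bool :=
  -- rows = [feeds[idx] for idx in feed_idxs]
  let rows := feed_idxs.map (fun idx => (PySem.List.pyGet? feeds idx).getD [])
  -- n = min(len(feeds[0]), len(target))
  let n := min ((PySem.List.pyGet? feeds 0).getD []).length target.length
  -- for i in range(n): if s < target[i]: return False / return True
  (List.range n).all (fun i => !decide (pvColSum rows i < target.getD i 0))

-- ===== PRECONDITION & SPEC =====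
-- Pre_ excludes exactly the inputs where A raises IndexError: empty feeds (feeds[0]),
-- an out-of-range feed index, or a selected feed longer than feeds[0] (total[i] += f past the end).
def Pre_is_enough (feed_idxs : List Int) (feeds : List (List Int)) (target : List Int) : Prop :=
  feeds ≠ [] ∧ ∀ idx ∈ feed_idxs,
    (PySem.List.pyGet? feeds idx).isSome = true ∧
    ((PySem.List.pyGet? feeds idx).getD []).length ≤ (feeds.headD []).length

instance (feed_idxs : List Int) (feeds : List (List Int)) (target : List Int) : Decidable (Pre_is_enough feed_idxs feeds target) := by unfold Pre_is_enough; infer_instance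

def pvWitness_is_enough : List Int × List (List Int) × List Int := ([0, 1], [[1, 2], [3, 4]], [4, 6])

def Spec_is_enough (feed_idxs : List Int) (feeds : List (List Int)) (target : List Int) (out : Bool) : Prop := out = is_enough_alt feed_idxs feeds target
instance (feed_idxs : List Int) (feeds : List (List Int)) (target : List Int) (out : Bool) : Decidable (Spec_is_enough feed_idxs feeds target out) := by unfold Spec_is_enough; infer_instance

-- ===== CLAIM (what is proved, stated in full; the proofs are below) =====
def Claim_equal_is_enough : Prop := ∀ (feed_idxs : List Int) (feeds : List (List Int)) (target : List Int), Dom_is_enough feed_idxs feeds target → Pre_is_enough feed_idxs feeds target → Spec_is_enough feed_idxs feeds target (is_enough feed_idxs feeds target)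

-- ===== LEMMAS AND PROOFS =====

theorem addRow_len_aux (l : List (Int × Int)) (t : List Int) :
    (l.foldl (fun t p => t.set p.1.toNat (t.getD p.1.toNat 0 + p.2)) t).length = t.length := by
  induction l generalizing t with
  | nil => rfl
  | cons p l ih => rw [List.foldl_cons, ih, List.length_set]

theorem addRow_length (total feed : List Int) : (pvA_addRow total feed).length = total.length :=
  addRow_len_aux _ _

theorem colSum_shift (rows : List (List Int)) (i : Nat) (a : Int) :
    rows.foldl (fun s row => s + row.getD i 0) a = a + pvColSum rows i := by
  induction rows generalizing a with
  | nil => simp [pvColSum]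
  | cons r rows ih =>
      rw [List.foldl_cons, ih]
      conv_rhs => rw [pvColSum, List.foldl_cons]
      rw [ih]
      ring

theorem colSum_cons (r : List Int) (rows : List (List Int)) (i : Nat) :
    pvColSum (r :: rows) i = r.getD i 0 + pvColSum rows i := by
  rw [pvColSum, List.foldl_cons, colSum_shift]
  ring

theorem addRow_getD (feed : List Int) (s : Nat) (t : List Int)
    (h : s + feed.length ≤ t.length) (i : Nat) :
    ((PySem.List.enumerate feed (s : Int)).foldl
      (fun t p => t.set p.1.toNat (t.getD p.1.toNat 0 + p.2)) t).getD i 0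
    = t.getD i 0 + (if s ≤ i ∧ i < s + feed.length then feed.getD (i - s) 0 else 0) := by
  induction feed generalizing s t with
  | nil =>
      simp [PySem.List.enumerate_nil]
  | cons a feed ih =>
      rw [PySem.List.enumerate_cons, List.foldl_cons]
      have hcast : (s : Int) + 1 = ((s + 1 : Nat) : Int) := by push_cast; ring
      rw [hcast]
      simp only [Int.toNat_natCast]
      have hs : s < t.length := by simp at h; omega
      rw [ih (s + 1) (t.set s (t.getD s 0 + a)) (by rw [List.length_set]; simp at h; omega)]
      by_cases hi : i = s
      · have hset : (t.set s (t.getD s 0 + a)).getD i 0 = t.getD s 0 + a := by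
          rw [hi]; simp [List.getD, hs]
        rw [hset, if_neg (by omega), if_pos (by simp; omega), hi]
        simp
      · have hset : (t.set s (t.getD s 0 + a)).getD i 0 = t.getD i 0 := by
          simp [List.getD, Ne.symm hi]
        rw [hset]
        by_cases h1 : s + 1 ≤ i ∧ i < s + 1 + feed.length
        · rw [if_pos h1, if_pos (by simp; omega)]
          have hidx : i - s = (i - (s + 1)) + 1 := by omega
          rw [hidx, List.getD_cons_succ]
        · rw [if_neg h1, if_neg (by simp; omega)]

theorem addRow_getD0 (feed t : List Int) (h : feed.length ≤ t.length) (i : Nat) :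
    (pvA_addRow t feed).getD i 0 = t.getD i 0 + feed.getD i 0 := by
  unfold pvA_addRow
  have h0 := addRow_getD feed 0 t (by omega) i
  simp only [Nat.cast_zero, Nat.zero_add, Nat.sub_zero, Nat.zero_le, true_and] at h0
  rw [h0]
  by_cases hi : i < feed.length
  · rw [if_pos hi]
  · rw [if_neg hi]
    have hz : feed.getD i 0 = 0 := List.getD_eq_default _ _ (by omega)
    rw [hz]

theorem fold_length (fi : List Int) (feeds : List (List Int)) (t : List Int) :
    (fi.foldl (fun t idx => pvA_addRow t ((PySem.List.pyGet? feeds idx).getD [])) t).length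
      = t.length := by
  induction fi generalizing t with
  | nil => simp
  | cons idx fi ih => simp [List.foldl, ih, addRow_length]

theorem fold_getD (fi : List Int) (feeds : List (List Int)) (t : List Int)
    (h : ∀ idx ∈ fi, ((PySem.List.pyGet? feeds idx).getD []).length ≤ t.length) (i : Nat) :
    (fi.foldl (fun t idx => pvA_addRow t ((PySem.List.pyGet? feeds idx).getD [])) t).getD i 0
      = t.getD i 0 + pvColSum (fi.map (fun idx => (PySem.List.pyGet? feeds idx).getD [])) i := by
  induction fi generalizing t with
  | nil => simp [pvColSum]
  | cons idx fi ih =>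
      simp only [List.foldl, List.map, colSum_cons]
      rw [ih _ (by intro j hj; rw [addRow_length]; exact h j (by simp [hj]))]
      rw [addRow_getD0 _ _ (h idx (by simp)) i]
      ring

theorem getD_replicate_zero (n i : Nat) : (List.replicate n (0 : Int)).getD i 0 = 0 := by
  simp [List.getD, List.getElem?_replicate]
  split <;> simp

theorem zip_all_eq (l l' : List Int) :
    (l.zip l').all (fun p => !decide (p.1 < p.2))
      = (List.range (min l.length l'.length)).all (fun i => !decide (l.getD i 0 < l'.getD i 0)) := by
  induction l generalizing l' with
  | nil => simp
  | cons a l ih =>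
      cases l' with
      | nil => simp
      | cons b l' =>
          simp only [List.zip_cons_cons, List.all_cons, List.length_cons,
            Nat.succ_min_succ, List.range_succ_eq_map, List.all_map]
          rw [ih l']
          simp only [Function.comp_def, List.getD_cons_succ, List.getD_cons_zero]

-- ===== VERDICT (by name: the statement is the Claim_ definition above) =====
theorem is_enough_spec : Claim_equal_is_enough := by
  intro fi feeds target _ hpre
  unfold Spec_is_enough
  obtain ⟨hne, hall⟩ := hpre
  obtain ⟨f0, rest, rfl⟩ : ∃ f0 rest, feeds = f0 :: rest := by
    cases feeds with
    | nil => exact absurd rfl hne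
    | cons f0 rest => exact ⟨f0, rest, rfl⟩
  unfold is_enough is_enough_alt
  simp only [PySem.List.pyGet?_zero_cons, Option.getD_some]
  rw [zip_all_eq, fold_length, List.length_replicate]
  congr 1
  funext i
  rw [fold_getD _ _ _ (by intro idx hidx; rw [List.length_replicate]; exact (hall idx hidx).2) i,
    getD_replicate_zero]
  simp
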